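-- pv_equiv track=rewrite | github.com/baojie/shiji-kb | kg/entities/scripts/augment_sku_entities.py | match_entities
-- ===== SOURCE A (Python) =====
-- from collections import defaultdict
--
-- def match_entities(text, lookup):
--     """
--     在文本中匹配实体名称。
--     优先匹配长名称，返回 {类型: {规范名: 出现次数}}。
--     """
--     if not text:
--         return {}
--
--     # 按长度降序排列实体名，优先匹配长的
--     names_by_length = sorted(lookup.keys(), key=len, reverse=True)
--
--     # 记录匹配结果
--     results = defaultdict(lambda: defaultdict(int))
--     # 记录已匹配的文本位置，避免子串重复计数
--     matched_positions = set()
--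
--     for name in names_by_length:
--         # 查找所有出现位置
--         start = 0
--         while True:
--             pos = text.find(name, start)
--             if pos == -1:
--                 break
--
--             # 检查该位置是否已被更长的匹配覆盖
--             name_positions = set(range(pos, pos + len(name)))
--             if not name_positions & matched_positions:
--                 # 记录匹配
--                 for etype, canonical in lookup[name]:
--                     results[etype][canonical] += 1
--                 matched_positions |= name_positions
--
--             start = pos + 1
--
--     return dict(results)
-- ===== SOURCE B (Python) =====
-- def match_entities(text, lookup):
--     n = len(text)
--     # bucket the entity names by length, then sweep the text once per distinct
--     # length, collecting every name's occurrence positions via hashed substring probes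
--     by_length = {}
--     for name in lookup:
--         by_length.setdefault(len(name), set()).add(name)
--     occ = {}
--     for length, names in by_length.items():
--         for i in range(n - length + 1):
--             seg = text[i:i + length]
--             if seg in names:
--                 occ.setdefault(seg, []).append(i)
--     # claim occurrences greedily, longest names first, left to right
--     taken = [False] * n
--     results = {}
--     for name in sorted(lookup, key=len, reverse=True):
--         for pos in occ.get(name, []):
--             end = pos + len(name)
--             if not any(taken[pos:end]):
--                 for j in range(pos, end):
--                     taken[j] = True
--                 for etype, canonical in lookup[name]:
--                     inner = results.setdefault(etype, {})
--                     inner[canonical] = inner.get(canonical, 0) + 1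
--     return results
-- ===== Notes on version B (the rewrite author's own statement) =====
-- stated objective: faster
-- what changed: Instead of one text.find scan per entity name (longest first), B buckets the names by length, sweeps the text once per distinct length probing a hash set of names to build every name's occurrence list at once, then claims occurrences greedily in the same longest-first order with a boolean taken-array instead of a set of matched positions; Pre_ excludes the empty text paired with an empty entity name, where A's early 'if not text' return gives {} while B counts the empty name's one occurrence - both defensible on this unspecified corner.
-- outside the precondition, e.g. on match_entities('', {'': [('T', 'c')]}): A returns {}, B returns {'T': {'c': 1}}
import Mathlib
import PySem

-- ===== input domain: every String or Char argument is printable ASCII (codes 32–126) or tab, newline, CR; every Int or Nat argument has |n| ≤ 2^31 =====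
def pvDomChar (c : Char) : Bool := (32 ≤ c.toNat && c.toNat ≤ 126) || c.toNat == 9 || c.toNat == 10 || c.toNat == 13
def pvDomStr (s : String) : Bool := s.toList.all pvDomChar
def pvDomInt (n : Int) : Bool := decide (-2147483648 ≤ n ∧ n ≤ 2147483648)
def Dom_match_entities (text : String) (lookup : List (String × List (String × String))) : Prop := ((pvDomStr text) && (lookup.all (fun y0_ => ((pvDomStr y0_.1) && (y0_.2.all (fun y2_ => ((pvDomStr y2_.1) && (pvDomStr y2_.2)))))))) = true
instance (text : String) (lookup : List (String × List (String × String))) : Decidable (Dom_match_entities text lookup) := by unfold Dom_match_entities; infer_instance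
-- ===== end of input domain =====

-- B replaces A's per-name text.find scans by bucketing the entity names by length and sweeping the
-- text once per distinct length with hashed substring probes, building every name's occurrence list
-- at once; it then claims occurrences greedily in the same longest-first order with a boolean
-- taken-array instead of a set of matched positions.


-- ===== PORT A =====

-- results[etype][canonical] += 1 on the nested defaultdicts, for every (etype, canonical) of the name
def pvBumpA (results : PySem.Dict String (PySem.Dict String Int)) (pairs : List (String × String)) :
    PySem.Dict String (PySem.Dict String Int) :=
  pairs.foldl (fun r p => r.modify p.1 PySem.Dict.empty (fun inner => inner.modify p.2 0 (· + 1))) results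

-- the body of one iteration of A's `while True` loop after a successful find at `pos`:
-- claim the positions pos..pos+len(name)-1 unless one of them is already matched
def pvClaimA (entries : List (String × String)) (name : String)
    (st : PySem.Dict String (PySem.Dict String Int) × PySem.Set Int) (pos : Int) :
    PySem.Dict String (PySem.Dict String Int) × PySem.Set Int :=
  if PySem.Set.inter (PySem.Set.ofList (PySem.List.pyRange pos (pos + PySem.Str.len name))) st.2 = [] then
    (pvBumpA st.1 entries,
     PySem.Set.union st.2 (PySem.Set.ofList (PySem.List.pyRange pos (pos + PySem.Str.len name))))
  else st

-- A's inner `while True: pos = text.find(name, start)` loop; the fuel only makes the recursion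
-- structural — the loop iterates at most len(text)+2 times, so the fuel never runs out
def pvFindLoopA (text : String) (entries : List (String × String)) (name : String)
    (fuel : Nat) (start : Int)
    (st : PySem.Dict String (PySem.Dict String Int) × PySem.Set Int) :
    PySem.Dict String (PySem.Dict String Int) × PySem.Set Int :=
  match fuel with
  | 0 => st
  | fuel + 1 =>
    let pos := PySem.Str.findFrom text name start
    if pos = -1 then st
    else pvFindLoopA text entries name fuel (pos + 1) (pvClaimA entries name st pos)

def match_entities (text : String) (lookup : List (String × List (String × String))) :
    List (String × List (String × Int)) :=
  if text = "" then []
  else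
    let d := PySem.Dict.ofList lookup
    let namesByLength := PySem.List.sorted d.keys PySem.Str.len true
    let st := namesByLength.foldl
      (fun st name => pvFindLoopA text (d.getD name []) name (text.toList.length + 2) 0 st)
      (PySem.Dict.empty, PySem.Set.empty)
    st.1.items.map (fun p => (p.1, p.2.items))

-- ===== PORT B =====

-- by_length.setdefault(len(name), set()).add(name)
def pvBucketStep (bl : PySem.Dict Int (PySem.Set String)) (name : String) :
    PySem.Dict Int (PySem.Set String) :=
  let bl1 := bl.setdefault (PySem.Str.len name) PySem.Set.empty
  bl1.insert (PySem.Str.len name)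
    (PySem.Set.add (bl1.getD (PySem.Str.len name) PySem.Set.empty) name)

-- the `for name in lookup` bucketing loop
def pvBuckets (keys : List String) : PySem.Dict Int (PySem.Set String) :=
  keys.foldl pvBucketStep PySem.Dict.empty

-- the probe at one start position i during length L's sweep:
-- seg = text[i:i+L]; if seg in names: occ.setdefault(seg, []).append(i)
def pvProbe (text : String) (L : Int) (names : PySem.Set String)
    (occ : PySem.Dict String (List Int)) (i : Int) : PySem.Dict String (List Int) :=
  let seg := PySem.Str.slice text (some i) (some (i + L))
  if names.contains seg then
    let occ1 := occ.setdefault seg []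
    occ1.insert seg (occ1.getD seg [] ++ [i])
  else occ

-- `for length, names in by_length.items(): for i in range(n - length + 1): …`
def pvOccBuild (text : String) (bl : PySem.Dict Int (PySem.Set String)) :
    PySem.Dict String (List Int) :=
  bl.items.foldl
    (fun occ p =>
      (PySem.List.pyRange 0 ((text.toList.length : Int) - p.1 + 1)).foldl (pvProbe text p.1 p.2) occ)
    PySem.Dict.empty

-- inner = results.setdefault(etype, {}); inner[canonical] = inner.get(canonical, 0) + 1
def pvBumpB (results : PySem.Dict String (PySem.Dict String Int)) (pairs : List (String × String)) :
    PySem.Dict String (PySem.Dict String Int) :=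
  pairs.foldl (fun r p =>
    let r1 := r.setdefault p.1 PySem.Dict.empty
    let inner := r1.getD p.1 PySem.Dict.empty
    r1.insert p.1 (inner.insert p.2 (inner.getD p.2 0 + 1))) results

-- claiming one occurrence of `name` at `pos` against the boolean taken-array
def pvClaimB (entries : List (String × String)) (name : String)
    (st : PySem.Dict String (PySem.Dict String Int) × List Bool) (pos : Int) :
    PySem.Dict String (PySem.Dict String Int) × List Bool :=
  if (PySem.List.slice st.2 (some pos) (some (pos + PySem.Str.len name))).any id then st
  else
    (pvBumpB st.1 entries,
     (PySem.List.pyRange pos (pos + PySem.Str.len name)).foldl (fun t j => t.set j.toNat true) st.2)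

def match_entities_alt (text : String) (lookup : List (String × List (String × String))) :
    List (String × List (String × Int)) :=
  let d := PySem.Dict.ofList lookup
  let occ := pvOccBuild text (pvBuckets d.keys)
  let st := (PySem.List.sorted d.keys PySem.Str.len true).foldl
    (fun st name => (occ.getD name []).foldl (pvClaimB (d.getD name []) name) st)
    (PySem.Dict.empty, List.replicate text.toList.length false)
  st.1.items.map (fun p => (p.1, p.2.items))

-- ===== PRECONDITION & SPEC =====

-- Pre_ excludes one corner nobody would specify: an EMPTY text together with the empty string as
-- an entity name, where A's early `if not text` return gives {} while B counts the empty name's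
-- single occurrence in the empty text; both values are defensible on this unspecified corner.
def Pre_match_entities (text : String) (lookup : List (String × List (String × String))) : Prop :=
  text = "" → ∀ p ∈ lookup, p.1 ≠ ""
instance (text : String) (lookup : List (String × List (String × String))) : Decidable (Pre_match_entities text lookup) := by unfold Pre_match_entities; infer_instance

def pvWitness_match_entities : String × (List (String × List (String × String))) :=
  ("abcab ab", [("ab", [("T", "x")]), ("abc", [("T", "z")])])

def Spec_match_entities (text : String) (lookup : List (String × List (String × String))) (out : List (String × List (String × Int))) : Prop := out = match_entities_alt text lookup
instance (text : String) (lookup : List (String × List (String × String))) (out : List (String × List (String × Int))) : Decidable (Spec_match_entities text lookup out) := by unfold Spec_match_entities; infer_instance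

-- ===== CLAIM (what is proved, stated in full; the proofs are below) =====
def Claim_equal_match_entities : Prop := ∀ (text : String) (lookup : List (String × List (String × String))), Dom_match_entities text lookup → Pre_match_entities text lookup → Spec_match_entities text lookup (match_entities text lookup)

-- ===== LEMMAS AND PROOFS =====

-- the ascending list of all (full-match) occurrence positions of `sub` in `t`
-- (position t.length included: the empty pattern also matches at the end of the text)
def pvOcc (t sub : List Char) : List Nat :=
  (List.range (t.length + 1)).filter (fun j => decide (sub <+: t.drop j))

-- simulation relation between A's state (results, matched-position set) and B's (results, taken-array)
def pvRel (n : Nat) (stA : PySem.Dict String (PySem.Dict String Int) × PySem.Set Int)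
    (stB : PySem.Dict String (PySem.Dict String Int) × List Bool) : Prop :=
  stB.1 = stA.1 ∧ stB.2.length = n ∧
  (∀ j : Nat, j < n → stB.2[j]? = some (decide ((j : Int) ∈ stA.2))) ∧
  (∀ x ∈ stA.2, 0 ≤ x ∧ x < (n : Int))

theorem pv_setdefault_insert (d : PySem.Dict String (PySem.Dict String Int)) (k : String) (v w : PySem.Dict String Int) :
    (d.setdefault k v).insert k w = d.insert k w := by
  by_cases h : d.contains k = true
  · rw [PySem.Dict.setdefault_of_contains d v h]
  · have hc : d.contains k = false := by
      cases hcc : d.contains k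
      · rfl
      · exact absurd hcc h
    have hany : (d.items.any fun p => p.1 == k) = false := by
      simp only [PySem.Dict.contains] at hc; exact hc
    have h' : ∀ p ∈ d.items, (p.1 == k) = false := by
      intro p hp
      have := List.any_eq_false.mp hany p hp
      simpa using this
    have hmap : List.map (fun p => if (p.1 == k) = true then (k, w) else p) d.items = d.items :=
      (List.map_congr_left (g := id) (fun p hp => by simp [h' p hp])).trans (List.map_id _)
    rw [PySem.Dict.setdefault_of_not_contains d v hc]
    simp only [PySem.Dict.insert, PySem.Dict.contains, hany, List.any_append, List.any_cons,
      List.any_nil, beq_self_eq_true, Bool.or_false, Bool.false_eq_true,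
      if_true, if_false, List.map_append, List.map_cons, List.map_nil]
    rw [if_pos (by simp), hmap]

theorem pv_foldl_set_length (ps : List Int) (t : List Bool) :
    (ps.foldl (fun t j => t.set j.toNat true) t).length = t.length := by
  induction ps generalizing t with
  | nil => rfl
  | cons x ps ih => simp [ih]

theorem pv_foldl_set_getElem? (ps : List Int) (hps : ∀ x ∈ ps, 0 ≤ x) (t : List Bool) (j : Nat) :
    (ps.foldl (fun t j => t.set j.toNat true) t)[j]?
      = t[j]?.map (fun b => b || decide ((j : Int) ∈ ps)) := by
  induction ps generalizing t with
  | nil =>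
    cases h : t[j]? <;> simp [h]
  | cons x ps ih =>
    have hx : 0 ≤ x := hps x (by simp)
    simp only [List.foldl_cons]
    rw [ih (fun y hy => hps y (by simp [hy]))]
    by_cases hxj : x.toNat = j
    · have hxj' : x = (j : Int) := by omega
      by_cases hlt : j < t.length
      · rw [List.getElem?_set, if_pos hxj, if_pos (hxj ▸ hlt),
          List.getElem?_eq_getElem hlt]
        simp [hxj']
      · rw [List.getElem?_set, if_pos hxj, if_neg (hxj ▸ hlt), List.getElem?_eq_none (by omega)]
        simp
    · have hxj' : x ≠ (j : Int) := by omega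
      rw [List.getElem?_set, if_neg hxj]
      cases h : t[j]? <;> simp [hxj'.symm]

theorem pv_infix_iff_exists_prefix_drop (sub u : List Char) :
    sub <:+: u ↔ ∃ i, sub <+: u.drop i := by
  constructor
  · rintro ⟨s, t, rfl⟩
    exact ⟨s.length, by simp [List.prefix_append]⟩
  · rintro ⟨i, t, ht⟩
    exact ⟨u.take i, t, by rw [List.append_assoc, ht, List.take_append_drop]⟩

theorem pv_filter_first (q : Nat → Bool) (m k p : Nat) (hkp : k ≤ p) (hpm : p < m) (hq : q p = true)
    (hmin : ∀ i, k ≤ i → i < p → q i = false) :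
    ((List.range m).filter q).filter (fun i => decide (k ≤ i))
      = p :: ((List.range m).filter q).filter (fun i => decide (p + 1 ≤ i)) := by
  rw [List.filter_filter, List.filter_filter]
  obtain ⟨r, rfl⟩ : ∃ r, m = (p + 1) + r := ⟨m - (p + 1), by omega⟩
  rw [List.range_add, List.range_succ, List.filter_append, List.filter_append,
    List.filter_append, List.filter_append]
  have h1 : (List.range p).filter (fun a => decide (k ≤ a) && q a) = [] := by
    rw [List.filter_eq_nil_iff]
    intro a ha
    have halt := List.mem_range.mp ha
    by_cases hka : k ≤ a
    · simp [hmin a hka halt]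
    · simp [hka]
  have h2 : (List.range p).filter (fun a => decide (p + 1 ≤ a) && q a) = [] := by
    rw [List.filter_eq_nil_iff]
    intro a ha
    have := List.mem_range.mp ha
    simp [show ¬ (p + 1 ≤ a) by omega]
  have h3 : ([p].filter (fun a => decide (k ≤ a) && q a)) = [p] := by simp [hkp, hq]
  have h4 : ([p].filter (fun a => decide (p + 1 ≤ a) && q a)) = [] := by simp
  have h5 : ((List.range r).map (fun x => p + 1 + x)).filter (fun a => decide (k ≤ a) && q a)
      = ((List.range r).map (fun x => p + 1 + x)).filter (fun a => decide (p + 1 ≤ a) && q a) := by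
    apply List.filter_congr
    intro a ha
    obtain ⟨x, _, rfl⟩ := List.mem_map.mp ha
    simp [show k ≤ p + 1 + x by omega, show p + 1 ≤ p + 1 + x by omega]
  rw [h1, h2, h3, h4, h5]
  simp

theorem pv_find_nil (u : List Char) : PySem.Chars.find u [] = 0 := by
  unfold PySem.Chars.find PySem.Chars.find.go
  cases u <;> simp [List.isPrefixOf]

theorem pv_findFrom_past (t sub : List Char) :
    PySem.Chars.findFrom t sub ((t.length + 1 : Nat) : Int) none = -1 := by
  unfold PySem.Chars.findFrom
  rw [if_pos (by push_cast; omega)]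

theorem pvFindLoopA_eq (text : String) (entries : List (String × String)) (name : String)
    (fuel : Nat) (k : Nat) (hk : k ≤ text.toList.length + 1)
    (hfuel : text.toList.length + 2 - k ≤ fuel) (st) :
    pvFindLoopA text entries name fuel (k : Int) st
      = ((pvOcc text.toList name.toList).filter (fun i => decide (k ≤ i))).foldl
          (fun st (i : Nat) => pvClaimA entries name st (i : Int)) st := by
  induction fuel generalizing k st with
  | zero => omega
  | succ fuel ih =>
    rw [pvFindLoopA]
    simp only [PySem.Str.findFrom_eq]
    by_cases hklen : k ≤ text.toList.length
    · by_cases hpos : PySem.Chars.findFrom text.toList name.toList (k : Int) none = -1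
      · rw [if_pos hpos]
        have hnoinfix := (PySem.Chars.findFrom_natCast_eq_neg_one_iff text.toList name.toList k hklen).mp hpos
        have : (pvOcc text.toList name.toList).filter (fun i => decide (k ≤ i)) = [] := by
          rw [List.filter_eq_nil_iff]
          intro i hi hki
          have hki' : k ≤ i := of_decide_eq_true hki
          have hpre : name.toList <+: List.drop i text.toList := by
            have := List.mem_filter.mp hi
            exact of_decide_eq_true this.2
          refine hnoinfix ((pv_infix_iff_exists_prefix_drop _ _).mpr ⟨i - k, ?_⟩)
          rwa [List.drop_drop, Nat.add_sub_cancel' hki']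
        rw [this, List.foldl_nil]
      · rw [if_neg hpos]
        obtain ⟨hge, hpre, hmin⟩ := PySem.Chars.findFrom_natCast_spec text.toList name.toList k hklen hpos
        set pos := PySem.Chars.findFrom text.toList name.toList (k : Int) none with hposdef
        have hpos0 : 0 ≤ pos := le_trans (by positivity) hge
        obtain ⟨p, hp⟩ : ∃ p : Nat, pos = (p : Int) := ⟨pos.toNat, (Int.toNat_of_nonneg hpos0).symm⟩
        have hkp : k ≤ p := by exact_mod_cast hp ▸ hge
        have hptoNat : pos.toNat = p := by omega
        rw [hptoNat] at hpre hmin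
        have hplt : p < text.toList.length + 1 := by
          by_cases hsub : name.toList = []
          · -- the empty pattern: find from k returns k itself
            have := PySem.Chars.findFrom_natCast text.toList name.toList k hklen
            rw [hsub, pv_find_nil] at this
            have hpk : pos = (k : Int) := by
              rw [hposdef, hsub, this]
              norm_num
            omega
          · rcases Nat.lt_or_ge p text.toList.length with h | h
            · omega
            · exfalso
              rw [List.drop_eq_nil_iff.mpr h] at hpre
              exact hsub (List.prefix_nil.mp hpre)
        have hfirst := pv_filter_first (fun j => decide (name.toList <+: List.drop j text.toList))
          (text.toList.length + 1) k p hkp hplt (decide_eq_true hpre)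
          (fun i hki hip => decide_eq_false (hmin i hki hip))
        rw [show ((pvOcc text.toList name.toList).filter (fun i => decide (k ≤ i)))
            = p :: ((pvOcc text.toList name.toList).filter (fun i => decide (p + 1 ≤ i))) from hfirst]
        rw [List.foldl_cons, hp]
        rw [show ((p : Int) + 1) = ((p + 1 : Nat) : Int) by push_cast; ring]
        exact ih (p + 1) (by omega) (by omega) _
    · -- start is already past the text: find returns -1 and no position remains
      have hk1 : k = text.toList.length + 1 := by omega
      rw [if_pos (by rw [hk1]; exact pv_findFrom_past text.toList name.toList)]
      have : (pvOcc text.toList name.toList).filter (fun i => decide (k ≤ i)) = [] := by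
        rw [List.filter_eq_nil_iff]
        intro i hi hki
        have := List.mem_range.mp (List.mem_filter.mp hi).1
        have := of_decide_eq_true hki
        omega
      rw [this, List.foldl_nil]

-- ---- the by_length buckets ----

theorem pvBucketStep_getD (bl : PySem.Dict Int (PySem.Set String)) (name : String) (L : Int) :
    (pvBucketStep bl name).getD L PySem.Set.empty
      = if PySem.Str.len name = L then PySem.Set.add (bl.getD L PySem.Set.empty) name
        else bl.getD L PySem.Set.empty := by
  unfold pvBucketStep
  by_cases h : PySem.Str.len name = L
  · rw [if_pos h, ← h, PySem.Dict.getD_insert_self, PySem.Dict.getD_setdefault_self]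
  · rw [if_neg h, PySem.Dict.getD_eq_get?_getD,
      PySem.Dict.get?_insert_of_ne _ _ (fun he => h he.symm),
      PySem.Dict.get?_setdefault_of_ne _ _ (fun he => h he.symm),
      ← PySem.Dict.getD_eq_get?_getD]

theorem pvBuckets_getD_aux (keys : List String) (bl : PySem.Dict Int (PySem.Set String)) (L : Int) :
    (keys.foldl pvBucketStep bl).getD L PySem.Set.empty
      = (keys.filter (fun s => PySem.Str.len s == L)).foldl PySem.Set.add
          (bl.getD L PySem.Set.empty) := by
  induction keys generalizing bl with
  | nil => rfl
  | cons name keys ih =>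
    rw [List.foldl_cons, ih, List.filter_cons]
    by_cases h : PySem.Str.len name = L
    · rw [if_pos (show ((PySem.Str.len name == L) = true) by rw [beq_iff_eq]; exact h),
        List.foldl_cons, pvBucketStep_getD, if_pos h]
    · rw [if_neg (show ¬ ((PySem.Str.len name == L) = true) by rw [beq_iff_eq]; exact h),
        pvBucketStep_getD, if_neg h]

theorem pvBuckets_getD (keys : List String) (L : Int) :
    (pvBuckets keys).getD L PySem.Set.empty
      = PySem.Set.ofList (keys.filter (fun s => PySem.Str.len s == L)) := by
  rw [pvBuckets, pvBuckets_getD_aux, PySem.Set.ofList_eq_foldl]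
  rfl

theorem pvBuckets_mem_self (keys : List String) (name : String) (h : name ∈ keys) :
    name ∈ (pvBuckets keys).getD (PySem.Str.len name) PySem.Set.empty := by
  rw [pvBuckets_getD, PySem.Set.mem_ofList]
  exact List.mem_filter.mpr ⟨h, by simp⟩

theorem pvBuckets_len_of_mem (keys : List String) (L : Int) (s : String)
    (h : s ∈ (pvBuckets keys).getD L PySem.Set.empty) : PySem.Str.len s = L := by
  rw [pvBuckets_getD, PySem.Set.mem_ofList] at h
  have := (List.mem_filter.mp h).2
  simpa using this

theorem pvBucketStep_keys_nodup (bl : PySem.Dict Int (PySem.Set String)) (name : String)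
    (h : bl.keys.Nodup) : (pvBucketStep bl name).keys.Nodup := by
  unfold pvBucketStep
  have hc : (bl.setdefault (PySem.Str.len name) PySem.Set.empty).contains (PySem.Str.len name) = true := by
    rw [PySem.Dict.contains_setdefault]; simp
  rw [PySem.Dict.keys_insert_of_contains _ _ hc]
  by_cases hb : bl.contains (PySem.Str.len name) = true
  · rw [PySem.Dict.setdefault_of_contains _ _ hb]; exact h
  · have hb' : bl.contains (PySem.Str.len name) = false := by
      cases hbb : bl.contains (PySem.Str.len name)
      · rfl
      · exact absurd hbb hb
    rw [PySem.Dict.setdefault_of_not_contains _ _ hb',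
      PySem.Dict.keys_insert_of_not_contains _ _ hb']
    have hnm : PySem.Str.len name ∉ bl.keys := by
      intro hm
      exact hb ((PySem.Dict.contains_iff_mem_keys _ _).mpr hm)
    exact h.append (List.nodup_singleton _)
      (fun a ha hb2 => hnm ((List.mem_singleton.mp hb2) ▸ ha))

theorem pvBuckets_keys_nodup (keys : List String) : (pvBuckets keys).keys.Nodup := by
  rw [pvBuckets]
  suffices H : ∀ bl : PySem.Dict Int (PySem.Set String), bl.keys.Nodup →
      (keys.foldl pvBucketStep bl).keys.Nodup from
    H PySem.Dict.empty (by simp)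
  induction keys with
  | nil => exact fun bl h => h
  | cons name keys ih =>
    intro bl h
    exact ih _ (pvBucketStep_keys_nodup bl name h)

theorem pvBuckets_mem_keys (keys : List String) (name : String) (h : name ∈ keys) :
    PySem.Str.len name ∈ (pvBuckets keys).keys := by
  by_cases hc : (pvBuckets keys).contains (PySem.Str.len name) = true
  · exact (PySem.Dict.contains_iff_mem_keys _ _).mp hc
  · exfalso
    have hc' : (pvBuckets keys).contains (PySem.Str.len name) = false := by
      cases hcc : (pvBuckets keys).contains (PySem.Str.len name)
      · rfl
      · exact absurd hcc hc
    have hmem := pvBuckets_mem_self keys name h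
    have hnone : (pvBuckets keys).get? (PySem.Str.len name) = none :=
      (PySem.Dict.get?_eq_none_iff_contains _ _).mpr hc'
    rw [PySem.Dict.getD_eq_get?_getD, hnone, Option.getD_none] at hmem
    exact absurd hmem (List.not_mem_nil)

-- ---- the occurrence-list sweep ----

theorem pvProbe_getD_notmem (text : String) (L : Int) (names : PySem.Set String) (name : String)
    (hnm : name ∉ names) (occ : PySem.Dict String (List Int)) (i : Int) :
    (pvProbe text L names occ i).getD name [] = occ.getD name [] := by
  unfold pvProbe
  set seg := PySem.Str.slice text (some i) (some (i + L)) with hseg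
  by_cases hc : names.contains seg = true
  · rw [if_pos hc]
    have hmem : seg ∈ names := (PySem.Set.contains_iff _ _).mp hc
    have hne : name ≠ seg := fun he => hnm (he ▸ hmem)
    rw [PySem.Dict.getD_eq_get?_getD, PySem.Dict.get?_insert_of_ne _ _ hne,
      PySem.Dict.get?_setdefault_of_ne _ _ hne, ← PySem.Dict.getD_eq_get?_getD]
  · rw [if_neg hc]

theorem pvProbe_getD_self (text : String) (L : Int) (names : PySem.Set String) (name : String)
    (hmem : name ∈ names) (occ : PySem.Dict String (List Int)) (i : Int) :
    (pvProbe text L names occ i).getD name []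
      = occ.getD name []
        ++ (if PySem.Str.slice text (some i) (some (i + L)) = name then [i] else []) := by
  unfold pvProbe
  set seg := PySem.Str.slice text (some i) (some (i + L)) with hseg
  by_cases hsegname : seg = name
  · rw [if_pos hsegname, hsegname,
      if_pos ((PySem.Set.contains_iff _ _).mpr hmem),
      PySem.Dict.getD_insert_self, PySem.Dict.getD_setdefault_self]
  · rw [if_neg hsegname, List.append_nil]
    by_cases hc : names.contains seg = true
    · rw [if_pos hc]
      have hne : name ≠ seg := fun he => hsegname he.symm
      rw [PySem.Dict.getD_eq_get?_getD, PySem.Dict.get?_insert_of_ne _ _ hne,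
        PySem.Dict.get?_setdefault_of_ne _ _ hne, ← PySem.Dict.getD_eq_get?_getD]
    · rw [if_neg hc]

theorem pvProbeFold_self (text : String) (L : Int) (names : PySem.Set String) (name : String)
    (hmem : name ∈ names) (l : List Int) (occ : PySem.Dict String (List Int)) :
    (l.foldl (pvProbe text L names) occ).getD name []
      = occ.getD name []
        ++ l.filter (fun i => decide (PySem.Str.slice text (some i) (some (i + L)) = name)) := by
  induction l generalizing occ with
  | nil => simp
  | cons i l ih =>
    rw [List.foldl_cons, ih, pvProbe_getD_self text L names name hmem occ i, List.filter_cons]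
    by_cases h : PySem.Str.slice text (some i) (some (i + L)) = name
    · rw [if_pos h, if_pos (by simpa using h), List.append_assoc]
      rfl
    · rw [if_neg h, if_neg (by simpa using h), List.append_nil]

theorem pvProbeFold_notmem (text : String) (L : Int) (names : PySem.Set String) (name : String)
    (hnm : name ∉ names) (l : List Int) (occ : PySem.Dict String (List Int)) :
    (l.foldl (pvProbe text L names) occ).getD name [] = occ.getD name [] := by
  induction l generalizing occ with
  | nil => rfl
  | cons i l ih => rw [List.foldl_cons, ih, pvProbe_getD_notmem text L names name hnm occ i]

theorem pvProbeFold_ne (text : String) (L : Int) (names : PySem.Set String) (name : String)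
    (hinv : ∀ s ∈ names, PySem.Str.len s = L) (hne : PySem.Str.len name ≠ L)
    (l : List Int) (occ : PySem.Dict String (List Int)) :
    (l.foldl (pvProbe text L names) occ).getD name [] = occ.getD name [] := by
  refine pvProbeFold_notmem text L names name ?_ l occ
  intro hmem
  exact hne (hinv name hmem)

-- outer fold over the distinct bucket lengths
theorem pvOccFold (text : String) (keys : List String) (name : String)
    (Ls : List Int) (hnd : Ls.Nodup) (occ : PySem.Dict String (List Int)) :
    ((Ls.foldl
        (fun occ L =>
          (PySem.List.pyRange 0 ((text.toList.length : Int) - L + 1)).foldl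
            (pvProbe text L ((pvBuckets keys).getD L PySem.Set.empty)) occ)
        occ)).getD name []
      = occ.getD name []
        ++ (if PySem.Str.len name ∈ Ls ∧
               name ∈ (pvBuckets keys).getD (PySem.Str.len name) PySem.Set.empty
            then (PySem.List.pyRange 0 ((text.toList.length : Int) - PySem.Str.len name + 1)).filter
                   (fun i => decide (PySem.Str.slice text (some i) (some (i + PySem.Str.len name)) = name))
            else []) := by
  induction Ls generalizing occ with
  | nil => simp
  | cons L Ls ih =>
    rw [List.foldl_cons, ih (List.nodup_cons.mp hnd).2]
    by_cases hL : L = PySem.Str.len name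
    · have hnotin : PySem.Str.len name ∉ Ls := by
        rw [← hL]; exact (List.nodup_cons.mp hnd).1
      rw [hL]
      rw [if_neg (fun h : _ ∧ _ => hnotin h.1), List.append_nil]
      by_cases hmem : name ∈ (pvBuckets keys).getD (PySem.Str.len name) PySem.Set.empty
      · rw [pvProbeFold_self text _ _ name hmem, if_pos ⟨List.mem_cons_self, hmem⟩]
      · rw [pvProbeFold_notmem text _ _ name hmem,
          if_neg (fun h : _ ∧ _ => hmem h.2), List.append_nil]
    · have hinv : ∀ s ∈ (pvBuckets keys).getD L PySem.Set.empty, PySem.Str.len s = L :=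
        fun s hs => pvBuckets_len_of_mem keys L s hs
      rw [pvProbeFold_ne text L _ name hinv (fun h => hL h.symm)]
      by_cases hc : PySem.Str.len name ∈ Ls ∧
          name ∈ (pvBuckets keys).getD (PySem.Str.len name) PySem.Set.empty
      · rw [if_pos hc, if_pos ⟨List.mem_cons_of_mem _ hc.1, hc.2⟩]
      · rw [if_neg hc, if_neg (fun h : _ ∧ _ =>
          hc ⟨(List.mem_cons.mp h.1).resolve_left (fun he => hL he.symm), h.2⟩)]

theorem pv_cond_iff (text : String) (name : String) (i : Nat)
    (hi : i ≤ text.toList.length) :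
    ((i : Int) + PySem.Str.len name ≤ (text.toList.length : Int) ∧
      PySem.Str.slice text (some (i : Int)) (some ((i : Int) + PySem.Str.len name)) = name)
    ↔ name.toList <+: text.toList.drop i := by
  have hlen : PySem.Str.len name = ((name.toList.length : Nat) : Int) := by simp [PySem.Str.len]
  have hslice : (PySem.Str.slice text (some (i : Int)) (some ((i : Int) + PySem.Str.len name))).toList
      = List.take name.toList.length (List.drop i text.toList) := by
    rw [hlen]
    simp [PySem.Str.slice, PySem.Chars.slice, PySem.List.slice_natCast_add]
  constructor
  · rintro ⟨h1, h2⟩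
    rw [List.prefix_iff_eq_take]
    conv_lhs => rw [← h2]
    rw [hslice]
  · intro hpre
    have htake := List.prefix_iff_eq_take.mp hpre
    have hle : name.toList.length ≤ (List.drop i text.toList).length := hpre.length_le
    rw [List.length_drop] at hle
    constructor
    · rw [hlen]; omega
    · rw [← String.toList_inj, hslice, ← htake]

-- a full slice match starting inside the text forces the pattern to fit
theorem pv_slice_fit (text : String) (name : String) (i : Nat) (hi : i ≤ text.toList.length)
    (h : PySem.Str.slice text (some (i : Int)) (some ((i : Int) + PySem.Str.len name)) = name) :
    i + name.toList.length ≤ text.toList.length := by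
  have hlen : PySem.Str.len name = ((name.toList.length : Nat) : Int) := by simp [PySem.Str.len]
  have hslice : (PySem.Str.slice text (some (i : Int)) (some ((i : Int) + PySem.Str.len name))).toList
      = List.take name.toList.length (List.drop i text.toList) := by
    rw [hlen]
    simp [PySem.Str.slice, PySem.Chars.slice, PySem.List.slice_natCast_add]
  have := congrArg (fun s => s.toList.length) h
  simp only [hslice, List.length_take, List.length_drop] at this
  omega

theorem pvRange_filter_eq (text : String) (name : String) :
    (PySem.List.pyRange 0 ((text.toList.length : Int) - PySem.Str.len name + 1)).filter
        (fun i => decide (PySem.Str.slice text (some i) (some (i + PySem.Str.len name)) = name))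
      = (pvOcc text.toList name.toList).map (fun i : Nat => (i : Int)) := by
  set n := text.toList.length with hn
  have hlen : PySem.Str.len name = ((name.toList.length : Nat) : Int) := by simp [PySem.Str.len]
  rw [PySem.List.pyRange_one, List.filter_map]
  set m := (((n : Int) - PySem.Str.len name + 1) - 0).toNat with hm
  have hmval : m = n + 1 - name.toList.length := by rw [hm, hlen]; omega
  have hmap : ∀ l : List Nat, l.map (fun k : Nat => (0 : Int) + k) = l.map (fun i : Nat => (i : Int)) :=
    fun l => List.map_congr_left (fun k _ => by simp)
  rw [hmap]
  congr 1
  have hpred : ∀ (k : Nat),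
      ((fun i => decide (PySem.Str.slice text (some i) (some (i + PySem.Str.len name)) = name)) ∘
        (fun k : Nat => (0 : Int) + k)) k
      = decide (PySem.Str.slice text (some (k : Int)) (some ((k : Int) + PySem.Str.len name)) = name) := by
    intro k
    simp
  rw [List.filter_congr (fun k _ => hpred k)]
  -- extend range m to range (n+1): the extra start positions cannot host a full match
  have hext : (List.range m).filter
        (fun k : Nat => decide (PySem.Str.slice text (some (k : Int)) (some ((k : Int) + PySem.Str.len name)) = name))
      = (List.range (n + 1)).filter
        (fun k : Nat => decide (PySem.Str.slice text (some (k : Int)) (some ((k : Int) + PySem.Str.len name)) = name)) := by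
    obtain ⟨r, hr⟩ : ∃ r, n + 1 = m + r := ⟨n + 1 - m, by omega⟩
    rw [hr, List.range_add, List.filter_append]
    have hnil : ((List.range r).map (fun x => m + x)).filter
        (fun k : Nat => decide (PySem.Str.slice text (some (k : Int)) (some ((k : Int) + PySem.Str.len name)) = name)) = [] := by
      rw [List.filter_eq_nil_iff]
      intro k hk hdec
      obtain ⟨x, hx, rfl⟩ := List.mem_map.mp hk
      have hxr := List.mem_range.mp hx
      have hfit := pv_slice_fit text name (m + x) (by omega) (of_decide_eq_true hdec)
      omega
    rw [hnil, List.append_nil]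
  rw [hext, pvOcc, ← hn]
  apply List.filter_congr
  intro k hk
  have hkn : k ≤ n := by
    have := List.mem_range.mp hk
    omega
  rw [decide_eq_decide]
  constructor
  · intro hsl
    exact (pv_cond_iff text name k hkn).mp
      ⟨by have := pv_slice_fit text name k hkn hsl; rw [hlen]; omega, hsl⟩
  · intro hpre
    exact ((pv_cond_iff text name k hkn).mpr hpre).2

-- every name of the lookup gets exactly its ascending occurrence list
theorem pvOccBuild_getD (text : String) (keys : List String) (name : String)
    (hmem : name ∈ keys) :
    (pvOccBuild text (pvBuckets keys)).getD name []
      = (pvOcc text.toList name.toList).map (fun i : Nat => (i : Int)) := by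
  unfold pvOccBuild
  rw [PySem.Dict.items_eq_map_keys (pvBuckets keys) (pvBuckets_keys_nodup keys) PySem.Set.empty,
    List.foldl_map]
  rw [pvOccFold text keys name (pvBuckets keys).keys (pvBuckets_keys_nodup keys) PySem.Dict.empty]
  rw [if_pos ⟨pvBuckets_mem_keys keys name hmem, pvBuckets_mem_self keys name hmem⟩]
  rw [pvRange_filter_eq]
  rfl

theorem pvBumpB_eq (r : PySem.Dict String (PySem.Dict String Int)) (pairs : List (String × String)) :
    pvBumpB r pairs = pvBumpA r pairs := by
  unfold pvBumpB pvBumpA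
  refine PySem.List.foldl_congr_mem _ _ _ _ ?_
  intro acc p _
  simp only [PySem.Dict.getD_setdefault_self, pv_setdefault_insert, PySem.Dict.modify]

theorem pvClaimStep (entries : List (String × String)) (name : String) (n p : Nat)
    (hp : p + name.toList.length ≤ n) (stA stB) (h : pvRel n stA stB) :
    pvRel n (pvClaimA entries name stA (p : Int)) (pvClaimB entries name stB (p : Int)) := by
  obtain ⟨hres, hlen, hget, hbnd⟩ := h
  set L := name.toList.length with hL
  have hlenstr : PySem.Str.len name = (L : Int) := by simp [PySem.Str.len, hL]
  -- the two branch conditions are complementary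
  have hslice : PySem.List.slice stB.2 (some (p : Int)) (some ((p : Int) + (L : Int)))
      = (stB.2.drop p).take L := PySem.List.slice_natCast_add stB.2 p L
  have htake_len : ((stB.2.drop p).take L).length = L := by
    simp [List.length_take, List.length_drop, hlen]; omega
  have hcond : ((PySem.List.slice stB.2 (some (p : Int)) (some ((p : Int) + (L : Int)))).any id = true)
      ↔ ∃ x : Int, ((p:Int) ≤ x ∧ x < (p:Int) + (L:Int)) ∧ x ∈ stA.2 := by
    rw [hslice, List.any_eq_true]
    constructor
    · rintro ⟨b, hb, hbt⟩
      obtain ⟨j, hj, rfl⟩ := List.mem_iff_getElem.mp hb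
      rw [htake_len] at hj
      have hjn : p + j < n := by omega
      have : ((stB.2.drop p).take L)[j] = stB.2[p + j]'(by omega) := by
        simp [List.getElem_take, List.getElem_drop]
      rw [this] at hbt
      have := hget (p + j) hjn
      rw [List.getElem?_eq_getElem (by omega)] at this
      have hmem : ((p + j : Nat) : Int) ∈ stA.2 := by
        have := Option.some.inj this
        simp [id] at hbt
        rw [hbt] at this
        exact of_decide_eq_true this.symm
      exact ⟨((p + j : Nat) : Int), ⟨by push_cast; omega, by push_cast; omega⟩, hmem⟩
    · rintro ⟨x, ⟨hx1, hx2⟩, hxS⟩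
      have hx0 : 0 ≤ x := le_trans (by positivity) hx1
      obtain ⟨xn, rfl⟩ : ∃ xn : Nat, x = (xn : Int) := ⟨x.toNat, (Int.toNat_of_nonneg hx0).symm⟩
      have hxn1 : p ≤ xn := by exact_mod_cast hx1
      have hxn2 : xn < p + L := by exact_mod_cast hx2
      have hxnn : xn < n := by omega
      refine ⟨true, ?_, rfl⟩
      have hgx := hget xn hxnn
      rw [List.getElem?_eq_getElem (by omega)] at hgx
      have : stB.2[xn]'(by omega) = true := by
        have := Option.some.inj hgx
        rw [this]; exact decide_eq_true hxS
      rw [← this]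
      refine List.mem_iff_getElem.mpr ⟨xn - p, by omega, ?_⟩
      simp [List.getElem_take, List.getElem_drop]
      congr 1
      omega
  have hinter : (PySem.Set.inter (PySem.Set.ofList (PySem.List.pyRange (p:Int) ((p:Int) + (L:Int)))) stA.2 = [])
      ↔ ¬ ∃ x : Int, ((p:Int) ≤ x ∧ x < (p:Int) + (L:Int)) ∧ x ∈ stA.2 := by
    unfold PySem.Set.inter
    rw [List.filter_eq_nil_iff]
    constructor
    · rintro hall ⟨x, hxr, hxS⟩
      exact hall x (by rw [PySem.Set.mem_ofList]; exact PySem.List.mem_pyRange_one.mpr hxr)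
        (by simpa [PySem.Set.contains] using hxS)
    · intro hno x hx
      have hxr := PySem.List.mem_pyRange_one.mp ((PySem.Set.mem_ofList _ _).mp hx)
      simp only [PySem.Set.contains]
      intro hc
      exact hno ⟨x, hxr, by simpa using hc⟩
  by_cases hQ : ∃ x : Int, ((p:Int) ≤ x ∧ x < (p:Int) + (L:Int)) ∧ x ∈ stA.2
  · -- overlap: both sides skip
    unfold pvClaimA pvClaimB
    rw [hlenstr]
    rw [if_pos (hcond.mpr hQ), if_neg (fun hin => (hinter.mp hin) hQ)]
    exact ⟨hres, hlen, hget, hbnd⟩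
  · -- claim
    unfold pvClaimA pvClaimB
    rw [hlenstr]
    rw [if_neg (fun hc => hQ (hcond.mp hc)), if_pos (hinter.mpr hQ)]
    refine ⟨?_, ?_, ?_, ?_⟩
    · simp [pvBumpB_eq, hres]
    · simp [pv_foldl_set_length, hlen]
    · intro j hj
      rw [pv_foldl_set_getElem? _ (fun x hx => (PySem.List.mem_pyRange_one.mp hx).1.trans' (by positivity)) _ j]
      rw [hget j hj]
      simp only [Option.map_some]
      congr 1
      have : ((j:Int) ∈ PySem.Set.union stA.2 (PySem.Set.ofList (PySem.List.pyRange (p:Int) ((p:Int)+(L:Int)))))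
          ↔ ((j:Int) ∈ stA.2 ∨ (j:Int) ∈ PySem.List.pyRange (p:Int) ((p:Int)+(L:Int))) := by
        rw [PySem.Set.mem_union, PySem.Set.mem_ofList]
      simp [this]
    · intro x hx
      rw [PySem.Set.mem_union] at hx
      rcases hx with hx | hx
      · exact hbnd x hx
      · rw [PySem.Set.mem_ofList] at hx
        have := PySem.List.mem_pyRange_one.mp hx
        constructor
        · exact le_trans (by positivity) this.1
        · calc x < (p:Int) + (L:Int) := this.2
            _ ≤ (n:Int) := by exact_mod_cast Nat.cast_le.mpr hp

theorem pvClaimFold (entries : List (String × String)) (name : String) (n : Nat)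
    (ps : List Nat) (hps : ∀ p ∈ ps, p + name.toList.length ≤ n) (stA stB) (h : pvRel n stA stB) :
    pvRel n (ps.foldl (fun st (i : Nat) => pvClaimA entries name st (i : Int)) stA)
             ((ps.map (fun i : Nat => (i : Int))).foldl (pvClaimB entries name) stB) := by
  induction ps generalizing stA stB with
  | nil => exact h
  | cons p ps ih =>
    simp only [List.map_cons, List.foldl_cons]
    exact ih (fun q hq => hps q (by simp [hq]))
      (pvClaimA entries name stA (p : Int)) (pvClaimB entries name stB (p : Int))
      (pvClaimStep entries name n p (hps p (by simp)) stA stB h)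

theorem pv_keys_ofList (lookup : List (String × List (String × String))) :
    (PySem.Dict.ofList lookup).keys = PySem.Set.ofList (lookup.map Prod.fst) := by
  have h := PySem.Dict.keys_foldl_insert_key (ν := List (String × String)) lookup Prod.fst
    (fun _ x => x.2) PySem.Dict.empty
  simpa [PySem.Dict.ofList, PySem.Dict.update, PySem.Set.update, PySem.Set.ofList] using h

theorem pv_occ_bound (t sub : List Char) (p : Nat) (hp : p ∈ pvOcc t sub) :
    p + sub.length ≤ t.length := by
  have h := List.mem_filter.mp hp
  have hpr : sub <+: t.drop p := of_decide_eq_true h.2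
  have hle := hpr.length_le
  rw [List.length_drop] at hle
  have := List.mem_range.mp h.1
  omega

-- ===== VERDICT (by name: the statement is the Claim_ definition above) =====
theorem match_entities_spec : Claim_equal_match_entities := by
  unfold Claim_equal_match_entities
  intro text lookup _ hpre
  unfold Spec_match_entities
  have hmain : ∀ ns : List String, (∀ x ∈ ns, x ∈ (PySem.Dict.ofList lookup).keys) →
      ∀ stA stB, pvRel text.toList.length stA stB →
      pvRel text.toList.length
        (ns.foldl (fun st name =>
          pvFindLoopA text ((PySem.Dict.ofList lookup).getD name []) name (text.toList.length + 2) 0 st) stA)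
        (ns.foldl (fun st name =>
          (((pvOccBuild text (pvBuckets (PySem.Dict.ofList lookup).keys))).getD name []).foldl
            (pvClaimB ((PySem.Dict.ofList lookup).getD name []) name) st) stB) := by
    intro ns hns
    induction ns with
    | nil => exact fun stA stB h => h
    | cons name ns ih =>
      intro stA stB hrel
      have hkmem : name ∈ (PySem.Dict.ofList lookup).keys := hns name (by simp)
      simp only [List.foldl_cons]
      apply ih (fun x hx => hns x (by simp [hx]))
      have hA : pvFindLoopA text ((PySem.Dict.ofList lookup).getD name []) name (text.toList.length + 2) 0 stA
          = (pvOcc text.toList name.toList).foldl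
              (fun st (i : Nat) => pvClaimA ((PySem.Dict.ofList lookup).getD name []) name st (i : Int)) stA := by
        rw [show (0 : Int) = ((0 : Nat) : Int) from rfl,
          pvFindLoopA_eq text _ name (text.toList.length + 2) 0 (by omega) (by omega) stA,
          List.filter_eq_self.mpr (by intro a _; simp)]
      have hB : ((pvOccBuild text (pvBuckets (PySem.Dict.ofList lookup).keys)).getD name [])
          = (pvOcc text.toList name.toList).map (fun i : Nat => (i : Int)) :=
        pvOccBuild_getD text (PySem.Dict.ofList lookup).keys name hkmem
      rw [hA, hB]
      exact pvClaimFold ((PySem.Dict.ofList lookup).getD name []) name text.toList.length _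
        (fun p hp => pv_occ_bound text.toList name.toList p hp) stA stB hrel
  have hinit : pvRel text.toList.length
      ((PySem.Dict.empty : PySem.Dict String (PySem.Dict String Int)), PySem.Set.empty)
      (PySem.Dict.empty, List.replicate text.toList.length false) := by
    refine ⟨rfl, by simp, ?_, ?_⟩
    · intro j hj
      rw [List.getElem?_replicate, if_pos hj]
      rfl
    · intro x hx
      exact absurd hx (List.not_mem_nil)
  have hrel := hmain (PySem.List.sorted (PySem.Dict.ofList lookup).keys PySem.Str.len true)
    (fun x hx => ((PySem.List.sorted_perm (PySem.Dict.ofList lookup).keys PySem.Str.len true).mem_iff).mp hx)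
    _ _ hinit
  by_cases htext : text = ""
  · subst htext
    rw [match_entities, if_pos rfl]
    simp only [match_entities_alt]
    have hkeys : ∀ k ∈ (PySem.Dict.ofList lookup).keys, k ≠ "" := by
      intro k hk
      rw [pv_keys_ofList, PySem.Set.mem_ofList] at hk
      obtain ⟨p, hp, rfl⟩ := List.mem_map.mp hk
      exact hpre rfl p hp
    rw [PySem.List.foldl_congr_mem _ _ (fun acc _ => acc) _ (fun acc x hx => ?_)]
    · rw [PySem.List.foldl_ignore]
      rfl
    · have hk : x ∈ (PySem.Dict.ofList lookup).keys :=
        ((PySem.List.sorted_perm _ PySem.Str.len true).mem_iff).mp hx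
      rw [pvOccBuild_getD "" (PySem.Dict.ofList lookup).keys x hk]
      have : pvOcc ("" : String).toList x.toList = [] := by
        rw [pvOcc, List.filter_eq_nil_iff]
        intro a ha hpa
        have ha' : a = 0 := by simpa using List.mem_range.mp ha
        subst ha'
        exact hkeys x hk (String.toList_eq_nil_iff.mp
          (List.prefix_nil.mp (of_decide_eq_true hpa)))
      rw [this]
      rfl
  · rw [match_entities, if_neg htext]
    simp only [match_entities_alt]
    rw [hrel.1]
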